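-- pv_equiv track=rewrite | github.com/emmenezes/programacao-competitiva | lista_0918/memory.py | defragment
-- ===== SOURCE A (Python) =====
-- def defragment(mem):
--     nova_mem = []
--     pos = 1
--     for espaco in mem:
--         tam = espaco[2] - espaco[1]
--         nova_mem.append([espaco[0], pos, pos + tam])
--         pos += tam + 1
--     return nova_mem
-- ===== SOURCE B (Python) =====
-- def _starts(sizes):
--     starts = []
--     p = 1
--     for t in sizes:
--         starts.append(p)
--         p += t + 1
--     return starts
--
-- def defragment(mem):
--     sizes = [e[2] - e[1] for e in mem]
--     starts = _starts(sizes)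
--     return [[e[0], s, s + t] for (e, (s, t)) in zip(mem, zip(starts, sizes))]
-- ===== Notes on version B (the rewrite author's own statement) =====
-- stated objective: alternative
-- what changed: B replaces A's single pass with a running pos accumulator by a two-phase decomposition: compute the sizes list, build the start-offsets table by a recursive prefix scan, then zip blocks with their precomputed starts.
import Mathlib
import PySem

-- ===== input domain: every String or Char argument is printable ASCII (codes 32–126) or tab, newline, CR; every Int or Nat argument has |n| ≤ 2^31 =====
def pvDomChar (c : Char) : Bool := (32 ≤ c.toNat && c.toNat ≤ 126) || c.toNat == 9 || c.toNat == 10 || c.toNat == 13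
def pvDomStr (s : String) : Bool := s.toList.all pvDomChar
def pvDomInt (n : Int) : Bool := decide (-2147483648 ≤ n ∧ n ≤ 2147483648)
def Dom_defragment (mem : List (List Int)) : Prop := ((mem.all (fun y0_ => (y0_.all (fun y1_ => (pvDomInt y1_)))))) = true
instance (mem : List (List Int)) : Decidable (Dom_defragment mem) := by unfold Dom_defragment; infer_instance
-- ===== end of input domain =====

-- B recomputes the packed layout in two phases (sizes list + recursive start-offset table, zipped) instead of A's inline running-position accumulator; objective: alternative decomposition.


-- ===== PORT A =====
-- A: one pass, appending [e[0], pos, pos+tam] and advancing the running pos accumulator.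
-- espaco[k] is ported with pyGetD (default 0); Pre_ guarantees the index is in range so it equals Python's espaco[k].
def defragment (mem : List (List Int)) : List (List Int) :=
  (mem.foldl
    (fun (acc : List (List Int) × Int) espaco =>
      let tam := PySem.List.pyGetD espaco 2 0 - PySem.List.pyGetD espaco 1 0
      (acc.1 ++ [[PySem.List.pyGetD espaco 0 0, acc.2, acc.2 + tam]], acc.2 + tam + 1))
    ([], 1)).1

-- ===== PORT B =====
-- B helper: prefix scan turning sizes into start offsets (loop appending the running p).
def startsOf (sizes : List Int) : List Int :=
  (sizes.foldl (fun (acc : List Int × Int) t => (acc.1 ++ [acc.2], acc.2 + t + 1)) ([], 1)).1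

def defragment_alt (mem : List (List Int)) : List (List Int) :=
  let sizes := mem.map (fun e => PySem.List.pyGetD e 2 0 - PySem.List.pyGetD e 1 0)
  let starts := startsOf sizes
  (mem.zip (starts.zip sizes)).map (fun est => [PySem.List.pyGetD est.1 0 0, est.2.1, est.2.1 + est.2.2])

-- ===== PRECONDITION & SPEC =====
-- Pre_ excludes blocks with fewer than 3 entries, on which Python A raises IndexError.
def Pre_defragment (mem : List (List Int)) : Prop := ∀ e ∈ mem, 3 ≤ e.length
instance (mem : List (List Int)) : Decidable (Pre_defragment mem) := by unfold Pre_defragment; infer_instance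
def pvWitness_defragment : List (List Int) := [[7, 2, 5], [3, 10, 12]]
def Spec_defragment (mem : List (List Int)) (out : List (List Int)) : Prop := out = defragment_alt mem
instance (mem : List (List Int)) (out : List (List Int)) : Decidable (Spec_defragment mem out) := by unfold Spec_defragment; infer_instance

-- ===== CLAIM (what is proved, stated in full; the proofs are below) =====
def Claim_equal_defragment : Prop := ∀ (mem : List (List Int)), Dom_defragment mem → Pre_defragment mem → Spec_defragment mem (defragment mem)

-- ===== LEMMAS AND PROOFS =====

-- canonical build of the result from a starting position
def buildFrom (p : Int) : List (List Int) → List (List Int)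
  | [] => []
  | e :: r =>
    let tam := PySem.List.pyGetD e 2 0 - PySem.List.pyGetD e 1 0
    [PySem.List.pyGetD e 0 0, p, p + tam] :: buildFrom (p + tam + 1) r

theorem foldlA_eq (mem : List (List Int)) : ∀ (acc : List (List Int)) (p : Int),
    (mem.foldl
      (fun (acc : List (List Int) × Int) espaco =>
        let tam := PySem.List.pyGetD espaco 2 0 - PySem.List.pyGetD espaco 1 0
        (acc.1 ++ [[PySem.List.pyGetD espaco 0 0, acc.2, acc.2 + tam]], acc.2 + tam + 1))
      (acc, p)).1 = acc ++ buildFrom p mem := by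
  induction mem with
  | nil => intro acc p; simp [buildFrom]
  | cons e r ih =>
    intro acc p
    simp only [List.foldl_cons, buildFrom]
    rw [ih]
    simp

-- proof-side recursive characterisation of the offsets table
def startsFrom (p : Int) : List Int → List Int
  | [] => []
  | t :: ts => p :: startsFrom (p + t + 1) ts

theorem startsOf_loop (sizes : List Int) : ∀ (acc : List Int) (p : Int),
    (sizes.foldl (fun (acc : List Int × Int) t => (acc.1 ++ [acc.2], acc.2 + t + 1)) (acc, p)).1
      = acc ++ startsFrom p sizes := by
  induction sizes with
  | nil => intro acc p; simp [startsFrom]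
  | cons t ts ih =>
    intro acc p
    simp only [List.foldl_cons, startsFrom]
    rw [ih]
    simp

theorem altB_eq (mem : List (List Int)) : ∀ (p : Int),
    ((mem.zip ((startsFrom p (mem.map (fun e => PySem.List.pyGetD e 2 0 - PySem.List.pyGetD e 1 0))).zip
        (mem.map (fun e => PySem.List.pyGetD e 2 0 - PySem.List.pyGetD e 1 0)))).map
      (fun est => [PySem.List.pyGetD est.1 0 0, est.2.1, est.2.1 + est.2.2])) = buildFrom p mem := by
  induction mem with
  | nil => intro p; simp [startsFrom, buildFrom]
  | cons e r ih =>
    intro p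
    simp only [List.map_cons, startsFrom, List.cons_append, List.nil_append, List.zip_cons_cons,
      List.map, buildFrom]
    rw [ih]

-- ===== VERDICT (by name: the statement is the Claim_ definition above) =====
theorem defragment_spec : Claim_equal_defragment := by
  intro mem _ _
  unfold Spec_defragment defragment defragment_alt startsOf
  rw [foldlA_eq mem [] 1]
  show buildFrom 1 mem = _
  simp only [startsOf_loop, List.nil_append]
  rw [altB_eq mem 1]
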